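-- pv_equiv track=rewrite | github.com/pedro-nishida/Logic-Programming | Conjuntos.py | injetora
-- ===== SOURCE A (Python) =====
-- def par(i, j, rel, n):
--     return 1<<i*n + j & rel == 1<<i*n + j
--
-- def injetora(rel, n):
--     aux = 0
--
--     for i in range(n):
--         for j in range(n):
--             if par(j, i, rel, n) and aux < 1:
--                 aux += 1
--             elif(par(j, i, rel, n)):
--                 return False
--         aux = 0
--     return True
-- ===== SOURCE B (Python) =====
-- def injetora(rel, n):
--     if n <= 0:
--         return True
--     total = n * n
--     if rel < 0 and total - (-rel - 1).bit_length() > n: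
--         # rel < 0: every bit position >= bit_length(~rel) is set; more than n of
--         # them lie below total, so two of them share a column.
--         return False
--     seen = set()
--     pos = 0
--     r = rel
--     while pos < total:
--         if r == 0:
--             return True
--         if r % 2:
--             col = pos % n
--             if col in seen:
--                 return False
--             seen.add(col)
--         r //= 2
--         pos += 1
--     return True
-- ===== Notes on version B (the rewrite author's own statement) =====
-- stated objective: faster
-- what changed: Replaces A's nested per-column loops (n*n iterations, each building a fresh 1<<(i*n+j) mask twice) by a single low-to-high scan of rel's bits that halves a running remainder, records each set bit's column pos % n in a seen-set and rejects on the first repeat, stopping as soon as the remainder is zero; a negative rel with more than n all-set high positions below n*n is rejected immediately by a bit_length pre-check.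
import Mathlib
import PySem

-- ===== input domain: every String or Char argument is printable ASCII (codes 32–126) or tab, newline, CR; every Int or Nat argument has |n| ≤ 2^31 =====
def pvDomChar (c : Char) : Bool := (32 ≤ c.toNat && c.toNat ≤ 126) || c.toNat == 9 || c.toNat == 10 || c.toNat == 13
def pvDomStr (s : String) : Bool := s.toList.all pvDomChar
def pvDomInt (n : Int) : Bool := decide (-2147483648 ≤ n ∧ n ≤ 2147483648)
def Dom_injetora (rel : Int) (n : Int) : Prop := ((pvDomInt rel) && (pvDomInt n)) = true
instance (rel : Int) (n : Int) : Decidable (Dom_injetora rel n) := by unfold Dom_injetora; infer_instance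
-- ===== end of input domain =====

-- Faster B: A's per-column nested counting loops become one low-to-high scan of the bits of rel
-- (halving a running remainder) with a seen-set of columns, stopping once the remainder is 0 (and a
-- bit_length pre-check rejecting a negative rel whose all-set high positions overflow a column).

-- ===== PORT A =====
-- par(i, j, rel, n): 1 << (i*n + j) ported as 2 ^ (i*n + j).toNat; the exponent is nonnegative at
-- every call site (i and j come from range(n)), where toNat is exact.
def par (i j rel n : Int) : Bool :=
  PySem.Int.band ((2:Int) ^ (i*n + j).toNat) rel == (2:Int) ^ (i*n + j).toNat

-- inner 'for j in range(n)' loop; returns false = Python's 'return False', true = loop finished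
def innerA (rel n i : Int) (aux : Int) : List Int → Bool
  | [] => true
  | j :: js =>
    if par j i rel n && decide (aux < 1) then innerA rel n i (aux + 1) js
    else if par j i rel n then false
    else innerA rel n i aux js

-- outer 'for i in range(n)' loop (aux is reset to 0 before each inner loop)
def outerA (rel n : Int) : List Int → Bool
  | [] => true
  | i :: is => if innerA rel n i 0 (PySem.List.pyRange 0 n 1) then outerA rel n is else false

def injetora (rel : Int) (n : Int) : Bool := outerA rel n (PySem.List.pyRange 0 n 1)

-- ===== PORT B =====
-- the 'while pos < total' loop of Source B; fuel = total - pos many iterations remain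
def goB (n : Int) : PySem.Set Int → Int → Int → Nat → Bool
  | _, _, _, 0 => true
  | seen, pos, r, k+1 =>
    if r = 0 then true
    else if PySem.Int.mod r 2 ≠ 0 then
      let col := PySem.Int.mod pos n
      if PySem.Set.contains seen col then false
      else goB n (PySem.Set.add seen col) (pos + 1) (PySem.Int.floordiv r 2) k
    else goB n seen (pos + 1) (PySem.Int.floordiv r 2) k

def injetora_alt (rel : Int) (n : Int) : Bool :=
  if n ≤ 0 then true
  else if rel < 0 ∧ n * n - (PySem.Int.bitLength (-rel - 1) : Int) > n then false
  else goB n PySem.Set.empty 0 rel (n * n).toNat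

-- ===== PRECONDITION & SPEC =====
def Spec_injetora (rel : Int) (n : Int) (out : Bool) : Prop := out = injetora_alt rel n
instance (rel : Int) (n : Int) (out : Bool) : Decidable (Spec_injetora rel n out) := by unfold Spec_injetora; infer_instance

-- ===== CLAIM (what is proved, stated in full; the proofs are below) =====
def Claim_equal_injetora : Prop := ∀ (rel : Int) (n : Int), Dom_injetora rel n → Spec_injetora rel n (injetora rel n)

-- ===== LEMMAS AND PROOFS =====

-- bit p of rel (two's complement), expressed through floor division as Source B reads it
def bitN (rel : Int) (p : Nat) : Bool :=
  PySem.Int.mod (PySem.Int.floordiv rel ((2:Int) ^ p)) 2 == 1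

lemma nat_lt_div_succ_mul (a b : Nat) (h : 0 < b) : a < (a/b+1)*b := by
  have h1 : b * (a / b) + a % b = a := Nat.div_add_mod a b
  have h2 : a % b < b := Nat.mod_lt a h
  have h3 : (a/b+1)*b = b * (a/b) + b := by ring
  omega

lemma band_two_pow (rel : Int) (k : Nat) :
    (PySem.Int.band ((2:Int) ^ k) rel = (2:Int) ^ k) ↔
      (PySem.Int.mod (PySem.Int.floordiv rel ((2:Int) ^ k)) 2 = 1) := by
  have hpow : ((2:Int) ^ k) = ((2^k : Nat) : Int) := by push_cast; ring
  have hposN : 0 < 2^k := Nat.two_pow_pos k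
  by_cases h : 0 ≤ rel
  · obtain ⟨m, rfl⟩ := Int.eq_ofNat_of_zero_le h
    have hmod : PySem.Int.mod ((m / 2^k : Nat) : Int) 2 = ((m / 2^k % 2 : Nat) : Int) := by
      exact_mod_cast PySem.Int.mod_natCast (m / 2^k) 2
    rw [hpow, PySem.Int.band_natCast, PySem.Int.floordiv_natCast, hmod, Nat.two_pow_and]
    cases hbt : m.testBit k
    · rw [Nat.testBit_eq_decide_div_mod_eq] at hbt
      have h2 : m / 2^k % 2 = 0 := by have := of_decide_eq_false hbt; omega
      simp [h2]
      omega
    · rw [Nat.testBit_eq_decide_div_mod_eq] at hbt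
      have h2 : m / 2^k % 2 = 1 := of_decide_eq_true hbt
      simp [h2]
  · have hm0 : 0 ≤ -rel - 1 := by omega
    obtain ⟨m, hm⟩ := Int.eq_ofNat_of_zero_le hm0
    have hrel : rel = -(m:Int) - 1 := by omega
    subst hrel
    have hband : PySem.Int.band ((2:Int)^k) (-(m:Int)-1)
        = ((2^k - (2^k &&& m) : Nat) : Int) := by
      simp only [PySem.Int.band]
      rw [if_pos (by positivity), if_neg (by omega)]
      have h1 : (-(-(m:Int)-1) - 1).toNat = m := by omega
      have h2 : ((2:Int)^k).toNat = 2^k := by rw [hpow]; exact Int.toNat_natCast _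
      rw [h1, h2]
    have hfd : PySem.Int.floordiv (-(m:Int)-1) ((2:Int)^k) = -((m / 2^k : Nat) : Int) - 1 := by
      rw [PySem.Int.floordiv_eq_iff_of_pos (by positivity)]
      have hlt : m < (m/2^k+1)*2^k := nat_lt_div_succ_mul m (2^k) hposN
      have hle : m/2^k*2^k ≤ m := Nat.div_mul_le_self m (2^k)
      constructor
      · rw [hpow]; push_cast; nlinarith [hlt]
      · rw [hpow]; push_cast; nlinarith [hle]
    have hmod : PySem.Int.mod (-((m / 2^k : Nat) : Int) - 1) 2
        = 1 - ((m / 2^k % 2 : Nat) : Int) := by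
      rw [PySem.Int.mod_eq_emod_of_pos (by norm_num)]
      have : ((m / 2^k % 2 : Nat) : Int) = ((m / 2^k : Nat) : Int) % 2 := by push_cast; rfl
      rw [this]; omega
    rw [hband, hfd, hmod, Nat.two_pow_and]
    cases hbt : m.testBit k
    · rw [Nat.testBit_eq_decide_div_mod_eq] at hbt
      have h2 : m / 2^k % 2 = 0 := by have := of_decide_eq_false hbt; omega
      simp [h2]
    · rw [Nat.testBit_eq_decide_div_mod_eq] at hbt
      have h2 : m / 2^k % 2 = 1 := of_decide_eq_true hbt
      simp [h2]
      omega

lemma par_eq_bit (rel : Int) (N i j : Nat) :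
    par (j : Int) (i : Int) rel (N : Int) = bitN rel (j * N + i) := by
  unfold par bitN
  have h1 : ((j:Int) * (N:Int) + (i:Int)) = ((j * N + i : Nat) : Int) := by push_cast; ring
  rw [h1, Int.toNat_natCast]
  apply Bool.eq_iff_iff.mpr
  simp only [beq_iff_eq]
  exact band_two_pow rel (j * N + i)

lemma fd_one (rel : Int) : PySem.Int.floordiv rel ((2:Int) ^ (0:Nat)) = rel := by
  rw [pow_zero, PySem.Int.floordiv_eq_ediv_of_pos one_pos, Int.ediv_one]

lemma fd_step (rel : Int) (p : Nat) :
    PySem.Int.floordiv (PySem.Int.floordiv rel ((2:Int) ^ p)) 2 =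
      PySem.Int.floordiv rel ((2:Int) ^ (p + 1)) := by
  rw [PySem.Int.floordiv_eq_ediv_of_pos (by positivity),
      PySem.Int.floordiv_eq_ediv_of_pos (by norm_num),
      PySem.Int.floordiv_eq_ediv_of_pos (by positivity),
      Int.ediv_ediv_of_nonneg (by positivity), pow_succ]

lemma fd_zero_bit (rel : Int) (p : Nat) (h : PySem.Int.floordiv rel ((2:Int) ^ p) = 0)
    (t : Nat) : bitN rel (p + t) = false := by
  rw [PySem.Int.floordiv_eq_iff_of_pos (by positivity)] at h
  have hb : 0 ≤ rel ∧ rel < 2 ^ p := by constructor <;> [linarith [h.1]; linarith [h.2]]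
  have hle : (2:Int) ^ p ≤ 2 ^ (p + t) := pow_le_pow_right₀ (by norm_num) (by omega)
  have h0 : PySem.Int.floordiv rel ((2:Int) ^ (p + t)) = 0 := by
    rw [PySem.Int.floordiv_eq_iff_of_pos (by positivity)]
    constructor <;> [linarith [hb.1]; linarith [hb.2]]
  unfold bitN
  rw [h0, PySem.Int.mod_eq_emod_of_pos (by norm_num)]
  decide

lemma innerA_count (rel n i : Int) (js : List Int) :
    ∀ aux : Int, 0 ≤ aux → aux ≤ 1 →
      innerA rel n i aux js
        = decide (aux + (js.countP (fun j => par j i rel n) : Int) ≤ 1) := by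
  induction js with
  | nil => intro aux h0 h1; simp [innerA]; omega
  | cons j js ih =>
    intro aux h0 h1
    cases hp : par j i rel n with
    | false =>
      simp only [innerA, hp, Bool.false_and, Bool.false_eq_true, if_false]
      rw [List.countP_cons]
      simp only [hp, Bool.false_eq_true, if_false, Nat.add_zero]
      exact ih aux h0 h1
    | true =>
      by_cases ha : aux < 1
      · simp only [innerA, hp, Bool.true_and, decide_eq_true_eq, if_pos ha]
        rw [ih (aux + 1) (by omega) (by omega), List.countP_cons]
        simp only [hp, if_true]
        have : (aux + 1 + ((js.countP (fun j => par j i rel n) : Nat) : Int) ≤ 1)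
             ↔ (aux + (((js.countP (fun j => par j i rel n) + 1 : Nat)) : Int) ≤ 1) := by
          push_cast; omega
        exact decide_eq_decide.mpr this
      · simp only [innerA, hp, Bool.true_and, decide_eq_true_eq, if_neg ha]
        rw [List.countP_cons]
        simp only [hp, if_true]
        have h2 : ¬ (aux + (((js.countP (fun j => par j i rel n) + 1 : Nat)) : Int) ≤ 1) := by
          push_cast; omega
        rw [decide_eq_false h2]

lemma outerA_all (rel n : Int) (is : List Int) :
    outerA rel n is = is.all (fun i => innerA rel n i 0 (PySem.List.pyRange 0 n 1)) := by
  induction is with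
  | nil => rfl
  | cons i is ih =>
    simp only [outerA, List.all_cons]
    cases innerA rel n i 0 (PySem.List.pyRange 0 n 1) <;> simp [ih]


lemma injetora_char (rel n : Int) (hn : 0 < n) :
    injetora rel n
      = decide (∀ i < n.toNat,
          (List.range n.toNat).countP (fun j => bitN rel (j * n.toNat + i)) ≤ 1) := by
  have hn' : (n.toNat : Int) = n := Int.toNat_of_nonneg (by omega)
  have hr : PySem.List.pyRange 0 n 1 = (List.range n.toNat).map (Nat.cast : Nat → Int) := by
    rw [PySem.List.pyRange_one, Int.sub_zero]
    apply List.map_congr_left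
    intro a _
    omega
  unfold injetora
  rw [outerA_all, hr, List.all_map]
  have hinner : ∀ i : Nat,
      innerA rel n (i : Int) 0 (PySem.List.pyRange 0 n 1)
        = decide ((List.range n.toNat).countP (fun j => bitN rel (j * n.toNat + i)) ≤ 1) := by
    intro i
    rw [innerA_count rel n (i : Int) _ 0 le_rfl zero_le_one, hr, List.countP_map]
    have hcong : List.countP ((fun j => par j (i:Int) rel n) ∘ (Nat.cast : Nat → Int))
        (List.range n.toNat)
        = List.countP (fun j => bitN rel (j * n.toNat + i)) (List.range n.toNat) := by
      apply List.countP_congr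
      intro x _
      have hc : ((fun j => par j (i:Int) rel n) ∘ (Nat.cast : Nat → Int)) x
          = bitN rel (x * n.toNat + i) := by
        show par (x : Int) (i : Int) rel n = _
        rw [← hn']
        exact par_eq_bit rel n.toNat i x
      rw [hc]
    rw [hcong]
    exact decide_eq_decide.mpr (by omega)
  simp only [hr] at hinner
  apply Bool.eq_iff_iff.mpr
  simp only [List.all_eq_true, decide_eq_true_eq]
  constructor
  · intro h i hi
    have := h i (List.mem_range.mpr hi)
    rw [Function.comp_apply, hinner i] at this
    exact of_decide_eq_true this
  · intro h i hi
    rw [Function.comp_apply, hinner i]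
    exact decide_eq_true (h i (List.mem_range.mp hi))

def colsOf (rel : Int) (N : Nat) (s k : Nat) : List Nat :=
  (((List.range k).map (s + ·)).filter (bitN rel)).map (· % N)

lemma colsOf_succ (rel : Int) (N s k : Nat) :
    colsOf rel N s (k+1)
      = (if bitN rel s then [s % N] else []) ++ colsOf rel N (s+1) k := by
  unfold colsOf
  rw [List.range_succ_eq_map, List.map_cons, List.map_map]
  have hcomp : ((s + ·) ∘ Nat.succ) = ((s + 1) + ·) := by funext x; simp; omega
  rw [hcomp, List.filter_cons]
  cases hb : bitN rel s <;> simp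

lemma colsOf_nil_of_fd_zero (rel : Int) (N s k : Nat)
    (h : PySem.Int.floordiv rel ((2:Int) ^ s) = 0) : colsOf rel N s k = [] := by
  unfold colsOf
  rw [List.filter_eq_nil_iff.mpr, List.map_nil]
  intro p hp
  obtain ⟨t, _, rfl⟩ := List.mem_map.mp hp
  simp [fd_zero_bit rel s h t]

lemma goB_main (rel n : Int) (hn : 0 < n) :
    ∀ (k s : Nat) (seen : PySem.Set Int),
      goB n seen (s : Int) (PySem.Int.floordiv rel ((2:Int) ^ s)) k
        = decide ((colsOf rel n.toNat s k).Nodup ∧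
            ∀ c ∈ colsOf rel n.toNat s k, ((c : Int) ∉ seen)) := by
  have hn' : (n.toNat : Int) = n := Int.toNat_of_nonneg (by omega)
  intro k
  induction k with
  | zero => intro s seen; simp [goB, colsOf]
  | succ k ih =>
    intro s seen
    set r := PySem.Int.floordiv rel ((2:Int) ^ s) with hr
    by_cases h0 : r = 0
    · simp [goB, h0, colsOf_nil_of_fd_zero rel n.toNat s (k+1) (hr ▸ h0)]
    · have hsucc : ((s : Int) + 1) = ((s + 1 : Nat) : Int) := by push_cast; ring
      have hfd2 : PySem.Int.floordiv r 2 = PySem.Int.floordiv rel ((2:Int) ^ (s+1)) := by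
        rw [hr]; exact fd_step rel s
      have hm01 : PySem.Int.mod r 2 = 0 ∨ PySem.Int.mod r 2 = 1 := by
        have h1 := PySem.Int.mod_nonneg r (b := 2) (by norm_num)
        have h2 := PySem.Int.mod_lt r (b := 2) (by norm_num)
        omega
      rcases hm01 with hm | hm
      · -- bit clear: skip this position
        have hmE : r % 2 = 0 := by
          rw [← PySem.Int.mod_eq_emod_of_pos (by norm_num : (0:Int) < 2)]; exact hm
        have hb : bitN rel s = false := by
          unfold bitN; rw [← hr, hm]; decide
        have hcols : colsOf rel n.toNat s (k+1) = colsOf rel n.toNat (s+1) k := by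
          rw [colsOf_succ, hb]; simp
        have hstep : goB n seen (s : Int) r (k+1)
            = goB n seen ((s:Int) + 1) (PySem.Int.floordiv r 2) k := by
          simp [goB, h0, hmE]
        rw [hstep, hsucc, hfd2, ih (s+1) seen, hcols]
      · -- bit set
        have hmE : r % 2 = 1 := by
          rw [← PySem.Int.mod_eq_emod_of_pos (by norm_num : (0:Int) < 2)]; exact hm
        have hb : bitN rel s = true := by
          unfold bitN; rw [← hr, hm]; rfl
        have hcol : PySem.Int.mod (s : Int) n = ((s % n.toNat : Nat) : Int) := by
          rw [← hn']
          exact PySem.Int.mod_natCast s n.toNat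
        have hcols : colsOf rel n.toNat s (k+1)
            = s % n.toNat :: colsOf rel n.toNat (s+1) k := by
          rw [colsOf_succ, hb]; simp
        rw [hcols]
        by_cases hc : PySem.Set.contains seen (PySem.Int.mod (s : Int) n) = true
        · have hcmem : PySem.Int.mod (s : Int) n ∈ seen :=
            (PySem.Set.contains_iff seen _).mp hc
          have hLHS : goB n seen (s : Int) r (k+1) = false := by
            simp [goB, h0, hmE, hcmem]
          rw [hLHS]
          symm
          apply decide_eq_false
          rintro ⟨-, hall⟩
          have := hall (s % n.toNat) List.mem_cons_self
          rw [← hcol] at this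
          exact this ((PySem.Set.contains_iff seen _).mp hc)
        · have hnotin : PySem.Int.mod (s : Int) n ∉ seen := by
            intro hmem
            exact hc ((PySem.Set.contains_iff seen _).mpr hmem)
          have hLHS : goB n seen (s : Int) r (k+1)
              = goB n (PySem.Set.add seen (PySem.Int.mod (s : Int) n))
                  ((s:Int) + 1) (PySem.Int.floordiv r 2) k := by
            simp [goB, h0, hmE, hnotin]
          rw [hLHS, hsucc, hfd2, ih (s+1) _]
          apply decide_eq_decide.mpr
          simp only [List.nodup_cons, List.mem_cons]
          constructor
          · rintro ⟨nd, hall⟩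
            have hall' : ∀ c ∈ colsOf rel n.toNat (s+1) k,
                ((c : Int)) ∉ seen ∧ ((c : Int)) ≠ PySem.Int.mod (s : Int) n := by
              intro c hcm
              have h1 := hall c hcm
              rw [PySem.Set.mem_add] at h1
              exact ⟨fun hx => h1 (Or.inl hx), fun hx => h1 (Or.inr hx)⟩
            refine ⟨⟨?_, nd⟩, ?_⟩
            · intro hmem
              exact (hall' _ hmem).2 hcol.symm
            · rintro c (rfl | hcm)
              · intro hx; apply hnotin; rw [hcol]; exact hx
              · exact (hall' c hcm).1
          · rintro ⟨⟨hhd, nd⟩, hall⟩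
            refine ⟨nd, ?_⟩
            intro c hcm
            rw [PySem.Set.mem_add]
            rintro (hx | hx)
            · exact hall c (Or.inr hcm) hx
            · rw [hcol] at hx
              have : c = s % n.toNat := by exact_mod_cast hx
              exact hhd (this ▸ hcm)

lemma injetora_alt_char (rel n : Int) (hn : 0 < n)
    (hnb : ¬ (rel < 0 ∧ n * n - (PySem.Int.bitLength (-rel - 1) : Int) > n)) :
    injetora_alt rel n = decide (colsOf rel n.toNat 0 (n.toNat * n.toNat)).Nodup := by
  have hn' : (n.toNat : Int) = n := Int.toNat_of_nonneg (by omega)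
  have htot : (n * n).toNat = n.toNat * n.toNat := by
    conv_lhs => rw [← hn', ← Nat.cast_mul]
    exact Int.toNat_natCast _
  unfold injetora_alt
  rw [if_neg (by omega), if_neg hnb, htot]
  have h := goB_main rel n hn (n.toNat * n.toNat) 0 PySem.Set.empty
  rw [fd_one] at h
  simp only [Nat.cast_zero] at h
  rw [h]
  apply decide_eq_decide.mpr
  constructor
  · exact fun h => h.1
  · intro h
    exact ⟨h, fun c hmem hx => by simp [PySem.Set.empty] at hx⟩

lemma count_cols (rel : Int) (N : Nat) (c : Nat) (hc : c < N) :
    ∀ M : Nat,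
      (List.range (M * N)).countP (fun p => (p % N == c) && bitN rel p)
        = (List.range M).countP (fun j => bitN rel (j * N + c)) := by
  intro M
  induction M with
  | zero => simp
  | succ M ih =>
    have hrange : List.range ((M+1) * N) = List.range (M * N)
        ++ (List.range N).map (fun x => M * N + x) := by
      rw [Nat.succ_mul, List.range_add]
    rw [hrange, List.countP_append, ih, List.range_succ, List.countP_append,
        List.countP_map]
    congr 1
    have hcong : List.countP ((fun p => (p % N == c) && bitN rel p)
          ∘ (fun x => M * N + x)) (List.range N)
        = List.countP (fun r => (r == c) && bitN rel (M * N + c)) (List.range N) := by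
      apply List.countP_congr
      intro r hr
      have hrN : r < N := List.mem_range.mp hr
      have hmod : (M * N + r) % N = r := by
        rw [mul_comm, Nat.mul_add_mod, Nat.mod_eq_of_lt hrN]
      simp only [Function.comp_apply, hmod, Bool.and_eq_true, beq_iff_eq]
      constructor
      · rintro ⟨rfl, hbit⟩; exact ⟨rfl, hbit⟩
      · rintro ⟨rfl, hbit⟩; exact ⟨rfl, hbit⟩
    rw [hcong]
    have hone : (List.range N).countP (fun r => (r == c) && bitN rel (M * N + c))
        = if bitN rel (M * N + c) then 1 else 0 := by
      cases hbit : bitN rel (M * N + c)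
      · simp
      · simp only [Bool.and_true]
        rw [← List.count_eq_countP]
        simp [List.count_range, hc]
    have htwo : List.countP (fun j => bitN rel (j * N + c)) [M]
        = if bitN rel (M * N + c) then 1 else 0 := by
      cases hbit : bitN rel (M * N + c) <;> simp [hbit]
    rw [hone, htwo]

lemma bridge (rel : Int) (N : Nat) (hN : 0 < N) :
    (colsOf rel N 0 (N * N)).Nodup ↔
      ∀ i < N, (List.range N).countP (fun j => bitN rel (j * N + i)) ≤ 1 := by
  have hL : colsOf rel N 0 (N * N)
      = ((List.range (N * N)).filter (bitN rel)).map (· % N) := by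
    unfold colsOf
    rw [show (List.range (N * N)).map (fun x => 0 + x) = List.range (N * N) by simp]
  have hcount : ∀ c : Nat,
      (colsOf rel N 0 (N * N)).count c
        = (List.range (N * N)).countP (fun p => (p % N == c) && bitN rel p) := by
    intro c
    rw [hL, List.count_eq_countP, List.countP_map, List.countP_filter]
    apply List.countP_congr
    intro p _
    simp
  rw [List.nodup_iff_count_le_one]
  constructor
  · intro h i hi
    have := h i
    rw [hcount i, count_cols rel N i hi N] at this
    exact this
  · intro h c
    by_cases hc : c < N
    · rw [hcount c, count_cols rel N c hc N]
      exact h c hc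
    · rw [List.count_eq_zero.mpr]
      · omega
      · intro hmem
        rw [hL] at hmem
        obtain ⟨p, -, rfl⟩ := List.mem_map.mp hmem
        exact hc (Nat.mod_lt p hN)

lemma two_le_length {l : List Nat} (a b : Nat) (ha : a ∈ l) (hb : b ∈ l)
    (hne : a ≠ b) : 2 ≤ l.length := by
  obtain ⟨s, t, rfl⟩ := List.append_of_mem ha
  rw [List.mem_append, List.mem_cons] at hb
  rcases hb with h | h | h
  · have := List.length_pos_of_mem h
    simp only [List.length_append, List.length_cons]
    omega
  · exact absurd h.symm hne
  · have := List.length_pos_of_mem h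
    simp only [List.length_append, List.length_cons]
    omega

lemma two_le_countP {l : List Nat} (p : Nat → Bool) (a b : Nat) (ha : a ∈ l)
    (hb : b ∈ l) (hpa : p a = true) (hpb : p b = true) (hne : a ≠ b) :
    2 ≤ l.countP p := by
  rw [List.countP_eq_length_filter]
  exact two_le_length a b (List.mem_filter.mpr ⟨ha, hpa⟩)
    (List.mem_filter.mpr ⟨hb, hpb⟩) hne

lemma bit_neg_high (rel : Int) (hneg : rel < 0) (p : Nat)
    (hp : PySem.Int.bitLength (-rel - 1) ≤ p) : bitN rel p = true := by
  have hm0 : 0 ≤ -rel - 1 := by omega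
  have hlt : (-rel - 1).natAbs < 2 ^ PySem.Int.bitLength (-rel - 1) :=
    PySem.Int.lt_two_pow_bitLength (-rel - 1)
  have hcast : ((-rel - 1).natAbs : Int) = -rel - 1 := Int.natAbs_of_nonneg hm0
  have hpow : ((2:Nat) ^ PySem.Int.bitLength (-rel - 1) : Nat) ≤ 2 ^ p :=
    Nat.pow_le_pow_right (by norm_num) hp
  have hrelbd : -rel - 1 < (2:Int) ^ p := by
    rw [← hcast]
    calc ((( -rel - 1).natAbs : Nat) : Int)
        < ((2 ^ PySem.Int.bitLength (-rel - 1) : Nat) : Int) := by exact_mod_cast hlt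
      _ ≤ (((2:Nat) ^ p : Nat) : Int) := by exact_mod_cast hpow
      _ = (2:Int) ^ p := by push_cast; ring
  have hfd : PySem.Int.floordiv rel ((2:Int) ^ p) = -1 := by
    rw [PySem.Int.floordiv_eq_iff_of_pos (by positivity)]
    constructor <;> [linarith; linarith]
  unfold bitN
  rw [hfd, PySem.Int.mod_eq_emod_of_pos (by norm_num)]
  decide

-- when rel is negative and more than n all-set high positions fit below n*n,
-- some column holds two pairs, so A's characterisation is false
lemma Aform_false (rel : Int) (N : Nat) (hN : 0 < N) (hneg : rel < 0)
    (hbig : N + PySem.Int.bitLength (-rel - 1) < N * N) :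
    ¬ (∀ i < N, (List.range N).countP (fun j => bitN rel (j * N + i)) ≤ 1) := by
  set bl := PySem.Int.bitLength (-rel - 1) with hbl
  intro hall
  set q := bl / N with hq
  set rm := bl % N with hrm
  have hi : rm < N := Nat.mod_lt bl hN
  have hdm : N * q + rm = bl := Nat.div_add_mod bl N
  have hmulsucc : N * (q + 1) = N * q + N := by ring
  have hj2 : q + 1 < N := by
    by_contra hx
    have hx' : N ≤ q + 1 := by omega
    have h1 : N * N ≤ N * (q + 1) := Nat.mul_le_mul_left N hx'
    omega
  have hcnt := hall rm hi
  have h2 : 2 ≤ (List.range N).countP (fun j => bitN rel (j * N + rm)) := by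
    apply two_le_countP _ q (q + 1)
    · exact List.mem_range.mpr (by omega)
    · exact List.mem_range.mpr hj2
    · have hpos : q * N + rm = bl := by rw [Nat.mul_comm] at hdm; exact hdm
      rw [hpos]
      exact bit_neg_high rel hneg bl le_rfl
    · have hpos : (q + 1) * N + rm = bl + N := by
        have : (q + 1) * N = q * N + N := by ring
        rw [this, Nat.mul_comm q N]
        omega
      rw [hpos]
      exact bit_neg_high rel hneg (bl + N) (by omega)
    · omega
  omega

-- ===== VERDICT (by name: the statement is the Claim_ definition above) =====
theorem injetora_spec : Claim_equal_injetora := by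
  intro rel n _
  unfold Spec_injetora
  by_cases hn : n ≤ 0
  · have h1 : PySem.List.pyRange 0 n 1 = [] := PySem.List.pyRange_one_eq_nil hn
    simp [injetora, injetora_alt, h1, outerA, hn]
  · have hn2 : 0 < n := not_le.mp hn
    have hn' : (n.toNat : Int) = n := Int.toNat_of_nonneg (by omega)
    have hN : 0 < n.toNat := by omega
    by_cases hbr : rel < 0 ∧ n * n - (PySem.Int.bitLength (-rel - 1) : Int) > n
    · have hB : injetora_alt rel n = false := by
        unfold injetora_alt
        rw [if_neg (by omega), if_pos hbr]
      rw [injetora_char rel n hn2, hB]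
      apply decide_eq_false
      apply Aform_false rel n.toNat hN hbr.1
      have h2 := hbr.2
      have h3 : ((n.toNat * n.toNat : Nat) : Int) - (PySem.Int.bitLength (-rel - 1) : Int)
          > ((n.toNat : Nat) : Int) := by push_cast; rw [hn']; linarith
      omega
    · rw [injetora_char rel n hn2, injetora_alt_char rel n hn2 hbr]
      simp only [decide_eq_decide]
      exact (bridge rel n.toNat hN).symm
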